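-- pv_equiv track=rewrite | github.com/kky5738/algorithms_study | baekjoon/단계별/5. 문자열/1316.py | check
-- ===== SOURCE A (Python) =====
-- def check(string:str) -> int:
--     checker = []
--
--     for idx, c in enumerate(string):
--         if not c in checker:
--             checker.append(c)
--
--         else:
--             if idx - checker.index(c) > 1 and checker[-1] != c:
--                 return 0
--
--     return 1
-- ===== SOURCE B (Python) =====
-- def check(string: str) -> int:
--     # Compress the string into the leading characters of its runs, then the
--     # word is a group-word iff those run keys are pairwise distinct.
--     runs = []
--     for c in string:
--         if not runs or runs[-1] != c:
--             runs.append(c)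
--     return 1 if len(runs) == len(set(runs)) else 0
-- ===== Notes on version B (the rewrite author's own statement) =====
-- stated objective: alternative
-- what changed: B compresses the string into its run keys and checks their global uniqueness with a set-size comparison, replacing A's single-pass checker list with membership, .index arithmetic and early return.
import Mathlib
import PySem

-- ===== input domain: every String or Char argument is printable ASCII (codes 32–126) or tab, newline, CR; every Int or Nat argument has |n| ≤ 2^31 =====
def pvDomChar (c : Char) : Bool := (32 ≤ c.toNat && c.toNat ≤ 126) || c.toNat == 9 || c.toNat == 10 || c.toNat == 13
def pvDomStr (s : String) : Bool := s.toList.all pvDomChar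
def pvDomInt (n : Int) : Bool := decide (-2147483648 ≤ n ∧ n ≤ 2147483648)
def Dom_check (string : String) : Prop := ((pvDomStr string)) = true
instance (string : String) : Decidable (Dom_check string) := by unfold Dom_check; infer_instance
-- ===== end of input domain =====

-- B replaces A's running checker-list/.index arithmetic by compressing the string
-- into its run keys and testing their uniqueness via a set-size comparison.

-- ===== PORT A =====
-- for idx, c in enumerate(string): membership / append / index / checker[-1] as in A.
-- '.index' is ported as 'index? … |>.getD 0': in the branch where it runs, c ∈ checker,
-- so index? is 'some' and the default is never used.
def checkLoopA : List Char → Int → List Char → Int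
  | [], _, _ => 1
  | c :: rest, idx, checker =>
    if ¬ (c ∈ checker) then
      checkLoopA rest (idx + 1) (checker ++ [c])
    else
      if idx - (((PySem.List.index? checker c).getD 0 : Nat) : Int) > 1 ∧
          PySem.List.pyGet? checker (-1) ≠ some c then
        0
      else
        checkLoopA rest (idx + 1) checker

def check (string : String) : Int := checkLoopA string.toList 0 []

-- ===== PORT B =====
-- runs = leading chars of the runs ('if not runs or runs[-1] != c: runs.append(c)'),
-- then 1 if len(runs) == len(set(runs)) else 0.
def runsOf (l : List Char) : List Char :=
  l.foldl (fun rs c => if rs = [] ∨ PySem.List.pyGet? rs (-1) ≠ some c then rs ++ [c] else rs) []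

def check_alt (string : String) : Int :=
  if (runsOf string.toList).length = (PySem.Set.ofList (runsOf string.toList)).length then 1 else 0

-- ===== PRECONDITION & SPEC =====
def Spec_check (string : String) (out : Int) : Prop := out = check_alt string
instance (string : String) (out : Int) : Decidable (Spec_check string out) := by unfold Spec_check; infer_instance

-- ===== CLAIM (what is proved, stated in full; the proofs are below) =====
def Claim_equal_check : Prop := ∀ (string : String), Dom_check string → Spec_check string (check string)

-- ===== LEMMAS AND PROOFS =====

-- last element of l, defaulting to prev
def lastO (prev : Option Char) : List Char → Option Char
  | [] => prev
  | c :: r => lastO (some c) r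

-- run keys of l given the previous character prev
def keysF (prev : Option Char) : List Char → List Char
  | [] => []
  | c :: r => if prev = some c then keysF prev r else c :: keysF (some c) r

theorem lastO_eq (l : List Char) : ∀ p, lastO p l = l.getLast?.or p := by
  induction l with
  | nil => intro p; simp [lastO]
  | cons c r ih =>
    intro p
    show lastO (some c) r = ((c :: r).getLast?).or p
    rw [ih (some c)]
    cases r with
    | nil => simp
    | cons d t =>
      have h : ((d :: t).getLast?).isSome := by simp
      obtain ⟨x, hx⟩ := Option.isSome_iff_exists.mp h
      rw [List.getLast?_cons_cons, hx]; rfl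

theorem keysF_append (u : List Char) : ∀ p v, keysF p (u ++ v) = keysF p u ++ keysF (lastO p u) v := by
  induction u with
  | nil => intro p v; rfl
  | cons c r ih =>
    intro p v
    show keysF p (c :: (r ++ v)) = keysF p (c :: r) ++ keysF (lastO (some c) r) v
    by_cases h : p = some c
    · simp only [keysF, if_pos h, ih]
      subst h; rfl
    · simp only [keysF, if_neg h, ih]
      rfl

theorem lastO_keysF (l : List Char) : ∀ p, lastO p (keysF p l) = lastO p l := by
  induction l with
  | nil => intro p; rfl
  | cons c r ih =>
    intro p
    by_cases h : p = some c
    · show lastO p (keysF p (c :: r)) = lastO (some c) r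
      rw [keysF, if_pos h, ih p, h]
    · show lastO p (keysF p (c :: r)) = lastO (some c) r
      rw [keysF, if_neg h]
      show lastO (some c) (keysF (some c) r) = lastO (some c) r
      exact ih (some c)

theorem mem_keysF_of_lastO (l : List Char) : ∀ p c, lastO p l = some c → c ∈ keysF p l ∨ p = some c := by
  induction l with
  | nil => intro p c h; exact Or.inr h
  | cons d r ih =>
    intro p c h
    have h' : lastO (some d) r = some c := h
    by_cases hd : p = some d
    · rw [keysF, if_pos hd]
      rcases ih (some d) c h' with h1 | h1
      · left; rw [hd]; exact h1
      · right; rw [hd, h1]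
    · rw [keysF, if_neg hd]
      rcases ih (some d) c h' with h1 | h1
      · left; exact List.mem_cons_of_mem _ h1
      · left; injection h1 with h1; rw [← h1]; exact List.mem_cons_self
theorem length_keysF_le (l : List Char) : ∀ p, (keysF p l).length ≤ l.length := by
  induction l with
  | nil => intro p; simp [keysF]
  | cons c r ih =>
    intro p
    by_cases h : p = some c
    · rw [keysF, if_pos h]
      exact Nat.le_succ_of_le (ih p)
    · rw [keysF, if_neg h]
      simpa using ih (some c)

theorem index_bound (ks : List Char) : ∀ c : Char, ks.Nodup → c ∈ ks → lastO none ks ≠ some c →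
    ∃ j, PySem.List.index? ks c = some j ∧ j + 2 ≤ ks.length := by
  induction ks with
  | nil => intro c _ hc; exact absurd hc (by simp)
  | cons d t ih =>
    intro c hnd hc hl
    by_cases hd : d = c
    · subst hd
      refine ⟨0, PySem.List.index?_cons_self d t, ?_⟩
      cases t with
      | nil => exact absurd rfl hl
      | cons e u => simp
    · have hct : c ∈ t := by
        rcases List.mem_cons.mp hc with h | h
        · exact absurd h.symm hd
        · exact h
      have htne : t ≠ [] := by intro h; rw [h] at hct; simp at hct
      have hlt : lastO none t ≠ some c := by
        intro h
        apply hl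
        show lastO (some d) t = some c
        cases t with
        | nil => exact absurd rfl htne
        | cons e u => exact h
      obtain ⟨j, hj, hjl⟩ := ih c (List.Nodup.of_cons hnd) hct hlt
      refine ⟨j + 1, ?_, by simp; omega⟩
      rw [PySem.List.index?_cons_of_ne _ hd, hj]; rfl

theorem getLast?_keysF_none (p : List Char) : (keysF none p).getLast? = lastO none p := by
  have h1 := lastO_eq (keysF none p) none
  have h2 := lastO_keysF p none
  simp [Option.or] at h1
  cases hk : (keysF none p).getLast? with
  | none => rw [hk] at h1; rw [← h2, h1]
  | some x => rw [hk] at h1; rw [← h2, h1]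

theorem keysF_singleton (p : Option Char) (c : Char) :
    keysF p [c] = if p = some c then [] else [c] := by
  by_cases h : p = some c
  · rw [keysF, if_pos h]; simp [keysF, h]
  · rw [keysF, if_neg h]; simp [keysF, h]

theorem keysF_append_singleton (p : List Char) (c : Char) :
    keysF none (p ++ [c]) = keysF none p ++ (if lastO none p = some c then [] else [c]) := by
  rw [keysF_append, keysF_singleton]

theorem checkLoopA_eq (rest : List Char) : ∀ p : List Char, (keysF none p).Nodup →
    checkLoopA rest (p.length : Int) (keysF none p) =
      if (keysF none (p ++ rest)).Nodup then 1 else 0 := by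
  induction rest with
  | nil =>
    intro p hnd
    simp [checkLoopA, hnd]
  | cons c r ih =>
    intro p hnd
    by_cases hmem : c ∈ keysF none p
    · -- c already a key
      by_cases hl : lastO none p = some c
      · -- same run continues: condition's 2nd conjunct is false
        have hget : PySem.List.pyGet? (keysF none p) (-1) = some c := by
          rw [PySem.List.pyGet?_neg_one, getLast?_keysF_none, hl]
        have hkeep : keysF none (p ++ [c]) = keysF none p := by
          rw [keysF_append_singleton, if_pos hl]; simp
        have step : checkLoopA (c :: r) (p.length : Int) (keysF none p) =
            checkLoopA r ((p.length : Int) + 1) (keysF none p) := by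
          rw [checkLoopA]
          rw [if_neg (by simp [hmem]), if_neg (by simp [hget])]
        rw [step]
        have := ih (p ++ [c]) (by rw [hkeep]; exact hnd)
        rw [hkeep] at this
        simpa [List.append_assoc] using this
      · -- duplicate key: A returns 0, and the keys of the whole word are not Nodup
        obtain ⟨j, hj, hjl⟩ := index_bound (keysF none p) c hnd hmem
          (by rw [lastO_keysF]; exact hl)
        have hlen : (keysF none p).length ≤ p.length := length_keysF_le p none
        have hget : PySem.List.pyGet? (keysF none p) (-1) ≠ some c := by
          rw [PySem.List.pyGet?_neg_one, getLast?_keysF_none]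
          intro h; exact hl h
        have step : checkLoopA (c :: r) (p.length : Int) (keysF none p) = 0 := by
          rw [checkLoopA]
          rw [if_neg (by simp [hmem]), if_pos ?_]
          refine ⟨?_, hget⟩
          rw [hj]
          simp only [Option.getD_some]
          omega
        rw [step]
        have hkeys : keysF none (p ++ (c :: r)) =
            keysF none p ++ (c :: keysF (some c) r) := by
          rw [keysF_append]
          congr 1
          rw [keysF, if_neg (by intro h; exact hl h)]
        have : ¬ (keysF none (p ++ (c :: r))).Nodup := by
          rw [hkeys, List.nodup_append]
          intro ⟨_, _, hdisj⟩
          exact hdisj c hmem c List.mem_cons_self rfl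
        rw [if_neg this]
    · -- new character: appended to the checker
      have hl : lastO none p ≠ some c := by
        intro h
        rcases mem_keysF_of_lastO p none c h with h1 | h1
        · exact hmem h1
        · exact absurd h1 (by simp)
      have hgrow : keysF none (p ++ [c]) = keysF none p ++ [c] := by
        rw [keysF_append_singleton, if_neg hl]
      have hnd' : (keysF none (p ++ [c])).Nodup := by
        rw [hgrow, List.nodup_append]
        refine ⟨hnd, List.nodup_singleton c, ?_⟩
        intro a ha b hb hab
        rw [List.mem_singleton] at hb
        subst hb
        exact hmem (hab ▸ ha)
      have step : checkLoopA (c :: r) (p.length : Int) (keysF none p) =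
          checkLoopA r ((p.length : Int) + 1) (keysF none p ++ [c]) := by
        rw [checkLoopA, if_pos (by simp [hmem])]
      rw [step]
      have := ih (p ++ [c]) hnd'
      rw [hgrow] at this
      simpa [List.append_assoc] using this

theorem ofList_sublist (xs : List Char) : List.Sublist (PySem.Set.ofList xs) xs := by
  induction xs using List.reverseRecOn with
  | nil => simp [PySem.Set.ofList_nil]
  | append_singleton t x ih =>
    rw [PySem.Set.ofList_append_singleton, PySem.Set.add]
    by_cases h : PySem.Set.contains (PySem.Set.ofList t) x
    · rw [if_pos h]
      exact ih.trans (List.sublist_append_left t [x])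
    · rw [if_neg h]
      exact List.Sublist.append ih (List.Sublist.refl [x])

theorem length_ofList_iff_nodup (xs : List Char) :
    xs.length = (PySem.Set.ofList xs).length ↔ xs.Nodup := by
  constructor
  · intro h
    have := List.Sublist.eq_of_length (ofList_sublist xs) h.symm
    rw [← this]
    exact PySem.Set.nodup_ofList xs
  · intro h
    rw [PySem.Set.ofList_eq_self_of_nodup xs h]

theorem foldl_runs (l : List Char) : ∀ p : List Char,
    l.foldl (fun rs c => if rs = [] ∨ PySem.List.pyGet? rs (-1) ≠ some c then rs ++ [c] else rs)
      (keysF none p) = keysF none (p ++ l) := by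
  induction l with
  | nil => intro p; simp
  | cons c r ih =>
    intro p
    have hstep : (if keysF none p = [] ∨ PySem.List.pyGet? (keysF none p) (-1) ≠ some c
        then keysF none p ++ [c] else keysF none p) = keysF none (p ++ [c]) := by
      rw [keysF_append_singleton]
      by_cases hl : lastO none p = some c
      · rw [if_pos hl, if_neg]
        · simp
        · intro hor
          rcases hor with h | h
          · rw [← getLast?_keysF_none] at hl
            rw [h] at hl; simp at hl
          · exact h (by rw [PySem.List.pyGet?_neg_one, getLast?_keysF_none, hl])
      · rw [if_neg hl, if_pos]
        right
        rw [PySem.List.pyGet?_neg_one, getLast?_keysF_none]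
        intro h; exact hl h
    rw [List.foldl_cons, hstep, ih (p ++ [c]), List.append_assoc]
    rfl

-- ===== VERDICT (by name: the statement is the Claim_ definition above) =====
theorem check_spec : Claim_equal_check := by
  intro string _
  unfold Spec_check check check_alt
  have hruns : runsOf string.toList = keysF none string.toList := by
    have h := foldl_runs string.toList []
    simp only [List.nil_append] at h
    exact h
  rw [hruns]
  have hA := checkLoopA_eq string.toList [] (by simp [keysF])
  simp only [List.length_nil, Int.natCast_zero, List.nil_append] at hA
  have : keysF none ([] : List Char) = [] := rfl
  rw [this] at hA
  rw [hA]
  by_cases h : (keysF none string.toList).Nodup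
  · rw [if_pos h, if_pos ((length_ofList_iff_nodup _).mpr h)]
  · rw [if_neg h, if_neg (fun hc => h ((length_ofList_iff_nodup _).mp hc))]
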